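-- pv_equiv track=rewrite | github.com/nubol23/bill-scanner | backend/app/engine/postprocess.py | _extract_series_letter
-- ===== SOURCE A (Python) =====
-- def _extract_series_letter(text: str, start_index: int) -> str | None:
--   series_letter: str | None = None
--
--   for character in text[start_index:]:
--     if character.isspace():
--       continue
--     if series_letter is not None:
--       return None
--     if not character.isalpha():
--       return None
--     series_letter = character.upper()
--
--   return series_letter
-- ===== SOURCE B (Python) =====
-- def _extract_series_letter(text: str, start_index: int) -> str | None:
--     s = text[start_index:]
--     n = len(s)
--     i = 0
--     while i < n and s[i].isspace():
--         i += 1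
--     if i == n:
--         return None
--     j = n - 1
--     while s[j].isspace():
--         j -= 1
--     if i != j:
--         return None
--     return s[i].upper() if s[i].isalpha() else None
-- ===== Notes on version B (the rewrite author's own statement) =====
-- stated objective: alternative
-- what changed: Replaced A's single forward streaming state machine (sentinel plus per-character early returns) with a two-pointer scan: advance i past leading whitespace, walk j back past trailing whitespace, return the uppercased character only if i == j and it is alphabetic.
import Mathlib
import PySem

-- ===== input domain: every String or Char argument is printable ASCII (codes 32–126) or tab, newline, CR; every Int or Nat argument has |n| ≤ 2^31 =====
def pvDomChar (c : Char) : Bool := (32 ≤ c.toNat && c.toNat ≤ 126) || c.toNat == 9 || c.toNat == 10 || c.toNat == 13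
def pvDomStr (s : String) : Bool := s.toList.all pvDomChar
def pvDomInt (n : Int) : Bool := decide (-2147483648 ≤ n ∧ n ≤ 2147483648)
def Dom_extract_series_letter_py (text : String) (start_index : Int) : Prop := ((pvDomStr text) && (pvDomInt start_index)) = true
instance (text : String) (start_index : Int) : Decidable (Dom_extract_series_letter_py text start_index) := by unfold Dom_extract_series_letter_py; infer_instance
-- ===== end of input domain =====

-- B replaces A's forward streaming state machine with a two-pointer scan from both ends (objective: alternative).
-- ===== PORT A =====
def extractLoopA : List Char → Option String → Option String
  | [], series_letter => series_letter
  | c :: rest, series_letter =>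
    if PySem.Chars.isspace c then extractLoopA rest series_letter
    else if series_letter.isSome then none
    else if !(PySem.Chars.isalpha c) then none
    else extractLoopA rest (some (String.ofList [PySem.Chars.upperChar c]))

def extract_series_letter_py (text : String) (start_index : Int) : Option String :=
  extractLoopA (PySem.Str.slice text (some start_index) none).toList none

-- ===== PORT B =====
-- `while i < n and s[i].isspace(): i += 1`, walking the list from the front
def firstNS : List Char → Nat → Nat
  | [], i => i
  | c :: r, i => if PySem.Chars.isspace c then firstNS r (i + 1) else i

-- `while s[j].isspace(): j -= 1`, walking the reversed list from the back
def lastNS : List Char → Nat → Nat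
  | [], j => j
  | c :: r, j => if PySem.Chars.isspace c then lastNS r (j - 1) else j

def extract_series_letter_py_alt (text : String) (start_index : Int) : Option String :=
  let l := (PySem.Str.slice text (some start_index) none).toList
  let n := l.length
  let i := firstNS l 0
  if i = n then none
  else
    let j := lastNS l.reverse (n - 1)
    if i ≠ j then none
    else
      let c := l.getD i ' '  -- i < n on this path, so getD is exactly Python's s[i]
      if PySem.Chars.isalpha c then some (String.ofList [PySem.Chars.upperChar c]) else none

-- ===== PRECONDITION & SPEC =====
def Spec_extract_series_letter_py (text : String) (start_index : Int) (out : Option String) : Prop := out = extract_series_letter_py_alt text start_index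
instance (text : String) (start_index : Int) (out : Option String) : Decidable (Spec_extract_series_letter_py text start_index out) := by unfold Spec_extract_series_letter_py; infer_instance

-- ===== CLAIM (what is proved, stated in full; the proofs are below) =====
def Claim_equal_extract_series_letter_py : Prop := ∀ (text : String) (start_index : Int), Dom_extract_series_letter_py text start_index → Spec_extract_series_letter_py text start_index (extract_series_letter_py text start_index)

-- ===== LEMMAS AND PROOFS =====

theorem extractLoopA_some (l : List Char) (s : String) :
    extractLoopA l (some s) =
      if l.filter (fun c => !PySem.Chars.isspace c) = [] then some s else none := by
  induction l with
  | nil => simp [extractLoopA]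
  | cons c rest ih =>
    by_cases hsp : PySem.Chars.isspace c
    · simp [extractLoopA, hsp, ih]
    · simp [extractLoopA, hsp]

theorem extractLoopA_none (l : List Char) :
    extractLoopA l none =
      match l.filter (fun c => !PySem.Chars.isspace c) with
      | [c] => if PySem.Chars.isalpha c then some (String.ofList [PySem.Chars.upperChar c]) else none
      | _ => none := by
  induction l with
  | nil => simp [extractLoopA]
  | cons c rest ih =>
    by_cases hsp : PySem.Chars.isspace c
    · simpa [extractLoopA, hsp] using ih
    · by_cases hal : PySem.Chars.isalpha c
      · have hstep : extractLoopA (c :: rest) none =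
            extractLoopA rest (some (String.ofList [PySem.Chars.upperChar c])) := by
          simp [extractLoopA, hsp, hal]
        rw [hstep, extractLoopA_some, List.filter_cons_of_pos (by simp [hsp])]
        cases hrest : rest.filter (fun c => !PySem.Chars.isspace c) <;> simp [hal]
      · have hstep : extractLoopA (c :: rest) none = none := by
          simp [extractLoopA, hsp, hal]
        rw [hstep, List.filter_cons_of_pos (by simp [hsp])]
        cases hrest : rest.filter (fun c => !PySem.Chars.isspace c) <;> simp [hal]

theorem firstNS_eq (l : List Char) (i : Nat) :
    firstNS l i = i + (l.takeWhile (fun c => PySem.Chars.isspace c)).length := by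
  induction l generalizing i with
  | nil => simp [firstNS]
  | cons c r ih =>
    by_cases hsp : PySem.Chars.isspace c
    · simp [firstNS, hsp, ih]; omega
    · simp [firstNS, hsp]

theorem lastNS_eq (l : List Char) (j : Nat) :
    lastNS l j = j - (l.takeWhile (fun c => PySem.Chars.isspace c)).length := by
  induction l generalizing j with
  | nil => simp [lastNS]
  | cons c r ih =>
    by_cases hsp : PySem.Chars.isspace c
    · simp [lastNS, hsp, ih]; omega
    · simp [lastNS, hsp]

-- the body of B, as a function of the sliced character list
def altCore (l : List Char) : Option String :=
  if firstNS l 0 = l.length then none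
  else if firstNS l 0 ≠ lastNS l.reverse (l.length - 1) then none
  else if PySem.Chars.isalpha (l.getD (firstNS l 0) ' ') then
    some (String.ofList [PySem.Chars.upperChar (l.getD (firstNS l 0) ' ')])
  else none

theorem takeWhile_stop {α : Type} (p : α → Bool) (a b : List α) (c : α)
    (h : ∀ x ∈ a, p x = true) (hc : p c = false) :
    (a ++ c :: b).takeWhile p = a := by
  induction a with
  | nil => simp [hc]
  | cons y a' ih =>
    rw [List.cons_append, List.takeWhile_cons, if_pos (h y (by simp))]
    simp [ih (fun x hx => h x (by simp [hx]))]

theorem takeWhile_append_lt {α : Type} (p : α → Bool) (a b : List α) (x : α)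
    (hx : x ∈ a) (hpx : p x = false) :
    ((a ++ b).takeWhile p).length < a.length := by
  induction a with
  | nil => simp at hx
  | cons y a' ih =>
    rw [List.cons_append, List.takeWhile_cons]
    by_cases hy : p y = true
    · rw [if_pos hy]
      rcases List.mem_cons.mp hx with rfl | hx'
      · simp [hy] at hpx
      · simpa using ih hx'
    · rw [if_neg hy]; simp

theorem altCore_eq_filter (l : List Char) :
    altCore l =
      match l.filter (fun c => !PySem.Chars.isspace c) with
      | [c] => if PySem.Chars.isalpha c then some (String.ofList [PySem.Chars.upperChar c]) else none
      | _ => none := by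
  have hsplit := (List.takeWhile_append_dropWhile (p := fun c => PySem.Chars.isspace c) (l := l)).symm
  cases hd : l.dropWhile (fun c => PySem.Chars.isspace c) with
  | nil =>
    -- all whitespace: i = n, B returns none; filter is empty
    have hfil : l.filter (fun c => !PySem.Chars.isspace c) = [] := by
      rw [List.filter_eq_nil_iff]
      intro a ha
      have : a ∈ l.takeWhile (fun c => PySem.Chars.isspace c) := by
        rw [hsplit] at ha; simpa [hd] using ha
      simpa using List.mem_takeWhile_imp this
    have hlen : (l.takeWhile (fun c => PySem.Chars.isspace c)).length = l.length := by
      conv_rhs => rw [hsplit]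
      simp [hd]
    simp [altCore, firstNS_eq, hfil, hlen]
  | cons c q =>
    have hc : PySem.Chars.isspace c = false := by
      have := List.head?_dropWhile_not (fun c => PySem.Chars.isspace c) l
      rw [hd] at this; simpa using this
    have hl : l = l.takeWhile (fun c => PySem.Chars.isspace c) ++ c :: q := by
      conv_lhs => rw [hsplit]
      rw [hd]
    set t := l.takeWhile (fun c => PySem.Chars.isspace c) with htdef
    have htsp : ∀ a ∈ t, PySem.Chars.isspace a = true := fun a ha => List.mem_takeWhile_imp ha
    have hfil : l.filter (fun c => !PySem.Chars.isspace c) =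
        c :: q.filter (fun c => !PySem.Chars.isspace c) := by
      rw [hl, List.filter_append]
      have : t.filter (fun c => !PySem.Chars.isspace c) = [] := by
        rw [List.filter_eq_nil_iff]; intro a ha; simp [htsp a ha]
      simp [this, hc]
    have hn : l.length = t.length + 1 + q.length := by
      rw [hl]; simp only [List.length_append, List.length_cons]; omega
    have hi : firstNS l 0 = t.length := by simp [firstNS_eq, htdef]
    have hine : firstNS l 0 ≠ l.length := by rw [hi]; omega
    have hget : l.getD t.length ' ' = c := by
      rw [hl, List.getD_eq_getElem?_getD, List.getElem?_append_right (by omega)]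
      simp
    have hrevassoc : l.reverse = q.reverse ++ c :: t.reverse := by
      rw [hl]; simp
    cases hq : q.filter (fun c => !PySem.Chars.isspace c) with
    | nil =>
      -- exactly one non-space char; i = j = t.length
      have hqsp : ∀ a ∈ q, PySem.Chars.isspace a = true := by
        intro a ha
        by_contra hna
        have : a ∈ q.filter (fun c => !PySem.Chars.isspace c) :=
          List.mem_filter.mpr ⟨ha, by simp [hna]⟩
        simp [hq] at this
      have hrev : l.reverse.takeWhile (fun c => PySem.Chars.isspace c) = q.reverse := by
        rw [hrevassoc]
        exact takeWhile_stop _ _ _ _ (fun x hx => hqsp x (by simpa using hx)) hc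
      have hj : lastNS l.reverse (l.length - 1) = t.length := by
        rw [lastNS_eq, hrev]; simp; omega
      rw [hfil, hq]
      unfold altCore
      rw [if_neg hine, hi, hj, if_neg (by simp), hget]
    | cons d r =>
      -- at least two non-space chars: i < j, B returns none; filter has ≥ 2 elements
      have hd' : d ∈ q ∧ PySem.Chars.isspace d = false := by
        have : d ∈ q.filter (fun c => !PySem.Chars.isspace c) := by simp [hq]
        have h2 := List.mem_filter.mp this
        exact ⟨h2.1, by simpa using h2.2⟩
      have hrevlen : (l.reverse.takeWhile (fun c => PySem.Chars.isspace c)).length < q.length := by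
        rw [hrevassoc]
        have := takeWhile_append_lt (fun c => PySem.Chars.isspace c) q.reverse (c :: t.reverse) d
          (by simpa using hd'.1) hd'.2
        simpa using this
      have hj := lastNS_eq l.reverse (l.length - 1)
      have hij : firstNS l 0 ≠ lastNS l.reverse (l.length - 1) := by
        rw [hi, hj]
        have hlr : l.reverse.length = l.length := by simp
        omega
      rw [hfil, hq]
      unfold altCore
      rw [if_neg hine, if_pos hij]

-- ===== VERDICT (by name: the statement is the Claim_ definition above) =====
theorem extract_series_letter_py_spec : Claim_equal_extract_series_letter_py := by
  intro text start_index _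
  unfold Spec_extract_series_letter_py extract_series_letter_py extract_series_letter_py_alt
  rw [extractLoopA_none]
  have := altCore_eq_filter (PySem.Str.slice text (some start_index) none).toList
  unfold altCore at this
  exact this.symm
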